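-- pv_equiv track=rewrite | github.com/FlanGrande/Voxelator | voxelator.py | _flood_fill_outside
-- ===== SOURCE A (Python) =====
-- from collections import deque
--
-- def _flood_fill_outside(dx, dy, dz, shell):
--     outside = set()
--     q = deque()
--
--     def try_push(ix, iy, iz):
--         cell = (ix, iy, iz)
--         if cell in shell or cell in outside:
--             return
--         outside.add(cell)
--         q.append(cell)
--
--     for ix in range(dx):
--         for iy in range(dy):
--             try_push(ix, iy, 0)
--             try_push(ix, iy, dz - 1)
--     for ix in range(dx):
--         for iz in range(dz):
--             try_push(ix, 0, iz)
--             try_push(ix, dy - 1, iz)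
--     for iy in range(dy):
--         for iz in range(dz):
--             try_push(0, iy, iz)
--             try_push(dx - 1, iy, iz)
--
--     neigh = ((1, 0, 0), (-1, 0, 0), (0, 1, 0), (0, -1, 0), (0, 0, 1), (0, 0, -1))
--     while q:
--         ix, iy, iz = q.popleft()
--         for nx, ny, nz in neigh:
--             tx = ix + nx
--             ty = iy + ny
--             tz = iz + nz
--             if 0 <= tx < dx and 0 <= ty < dy and 0 <= tz < dz:
--                 cell = (tx, ty, tz)
--                 if cell not in shell and cell not in outside:
--                     outside.add(cell)
--                     q.append(cell)
--
--     return outside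
-- ===== SOURCE B (Python) =====
-- def _flood_fill_outside(dx, dy, dz, shell):
--     # Queue-free re-implementation: the outside region is the closure of the
--     # seeded faces under the good-neighbour relation.  Instead of a BFS worklist
--     # we compute that closure by iterated full passes: rescan every cell
--     # discovered so far (an insertion-ordered dict), appending its in-bounds
--     # non-shell neighbours, until one whole pass discovers nothing new.
--     outside = {}
--     for cell in ([(ix, iy, z) for ix in range(dx) for iy in range(dy) for z in (0, dz - 1)]
--                  + [(ix, y, iz) for ix in range(dx) for iz in range(dz) for y in (0, dy - 1)]
--                  + [(x, iy, iz) for iy in range(dy) for iz in range(dz) for x in (0, dx - 1)]):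
--         if cell not in shell:
--             outside[cell] = None
--     changed = True
--     while changed:
--         changed = False
--         for x, y, z in list(outside):
--             for t in ((x + 1, y, z), (x - 1, y, z), (x, y + 1, z),
--                       (x, y - 1, z), (x, y, z + 1), (x, y, z - 1)):
--                 if (0 <= t[0] < dx and 0 <= t[1] < dy and 0 <= t[2] < dz
--                         and t not in shell and t not in outside):
--                     outside[t] = None
--                     changed = True
--     result = set()
--     for cell in outside:
--         result.add(cell)
--     return result
-- ===== Notes on version B (the rewrite author's own statement) =====
-- stated objective: alternative
-- what changed: Replaced the deque BFS (try_push closure seeding a queue, then one-cell-at-a-time queue expansion) by a queue-free closure computation: seed the six faces into an insertion-ordered dict, then repeat full passes that rescan every cell discovered so far and append its in-bounds non-shell neighbours, until one whole pass discovers nothing new.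
import Mathlib
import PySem

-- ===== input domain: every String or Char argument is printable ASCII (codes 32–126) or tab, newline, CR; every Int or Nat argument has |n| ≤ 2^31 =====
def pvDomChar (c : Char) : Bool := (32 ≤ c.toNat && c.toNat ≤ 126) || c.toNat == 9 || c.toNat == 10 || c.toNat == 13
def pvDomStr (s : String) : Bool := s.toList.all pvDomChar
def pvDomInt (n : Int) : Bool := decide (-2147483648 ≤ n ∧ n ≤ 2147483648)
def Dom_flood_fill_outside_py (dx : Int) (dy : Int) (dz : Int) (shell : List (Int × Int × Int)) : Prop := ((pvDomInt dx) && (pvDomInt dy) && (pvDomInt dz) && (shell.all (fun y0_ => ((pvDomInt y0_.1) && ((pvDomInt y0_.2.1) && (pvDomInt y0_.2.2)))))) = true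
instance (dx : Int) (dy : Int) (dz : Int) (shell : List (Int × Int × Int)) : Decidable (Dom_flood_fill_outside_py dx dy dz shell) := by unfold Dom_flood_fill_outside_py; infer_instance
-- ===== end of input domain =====

-- B replaces A's deque-based BFS by a queue-free closure computation: seed the six faces, then
-- repeat full passes that rescan every cell discovered so far, appending its in-bounds non-shell
-- neighbours, until a pass discovers nothing (alternative decomposition, no speed claim). Both Pythons return a
-- SET; since PySem does not model set iteration order, both ports return the set's elements sorted
-- by the coordinate key pvEnc (injective on the Dom coordinate range), the canonical representative.

-- shared output canonicalisation and the neighbour offsets (the same literal tuple in both Pythons)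
def pvAdd (c d : Int × Int × Int) : Int × Int × Int := (c.1 + d.1, c.2.1 + d.2.1, c.2.2 + d.2.2)
def pvNeigh : List (Int × Int × Int) := [(1,0,0),(-1,0,0),(0,1,0),(0,-1,0),(0,0,1),(0,0,-1)]
def pvEnc (c : Int × Int × Int) : Int := (c.1 * 1099511627776 + c.2.1) * 1099511627776 + c.2.2
def pvCanon (s : List (Int × Int × Int)) : List (Int × Int × Int) := PySem.List.sorted s pvEnc false

-- ===== PORT A =====
-- try_push(ix, iy, iz): state = (outside, q)
def pvTryPush (shell : List (Int × Int × Int))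
    (st : List (Int × Int × Int) × List (Int × Int × Int)) (c : Int × Int × Int) :
    List (Int × Int × Int) × List (Int × Int × Int) :=
  if c ∈ shell ∨ c ∈ st.1 then st else (PySem.Set.add st.1 c, st.2 ++ [c])

-- the three seeding double loops
def pvSeed (dx dy dz : Int) (shell : List (Int × Int × Int)) :
    List (Int × Int × Int) × List (Int × Int × Int) :=
  let st1 := (PySem.List.pyRange 0 dx 1).foldl (fun st ix =>
      (PySem.List.pyRange 0 dy 1).foldl (fun st iy =>
        pvTryPush shell (pvTryPush shell st (ix, iy, 0)) (ix, iy, dz - 1)) st)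
    (PySem.Set.empty, [])
  let st2 := (PySem.List.pyRange 0 dx 1).foldl (fun st ix =>
      (PySem.List.pyRange 0 dz 1).foldl (fun st iz =>
        pvTryPush shell (pvTryPush shell st (ix, 0, iz)) (ix, dy - 1, iz)) st) st1
  (PySem.List.pyRange 0 dy 1).foldl (fun st iy =>
      (PySem.List.pyRange 0 dz 1).foldl (fun st iz =>
        pvTryPush shell (pvTryPush shell st (0, iy, iz)) (dx - 1, iy, iz)) st) st2

-- while q: pop left, push unseen in-bounds non-shell neighbours (fuel only makes the loop total)
def pvBfs (dx dy dz : Int) (shell : List (Int × Int × Int)) :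
    Nat → List (Int × Int × Int) → List (Int × Int × Int) → List (Int × Int × Int)
  | _, outside, [] => outside
  | 0, outside, _ :: _ => outside
  | fuel+1, outside, c :: q =>
      let st := pvNeigh.foldl (fun st d =>
        let t := pvAdd c d
        if 0 ≤ t.1 ∧ t.1 < dx ∧ 0 ≤ t.2.1 ∧ t.2.1 < dy ∧ 0 ≤ t.2.2 ∧ t.2.2 < dz ∧
            t ∉ shell ∧ t ∉ st.1
        then (PySem.Set.add st.1 t, st.2 ++ [t]) else st) (outside, q)
      pvBfs dx dy dz shell fuel st.1 st.2

def flood_fill_outside_py (dx : Int) (dy : Int) (dz : Int) (shell : List (Int × Int × Int)) : List (Int × Int × Int) :=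
  let st := pvSeed dx dy dz shell
  pvCanon (pvBfs dx dy dz shell (st.2.length + dx.toNat * dy.toNat * dz.toNat) st.1 st.2)

-- ===== PORT B =====
-- the one concatenated face comprehension of B's seeding loop
def pvCandAlt (dx dy dz : Int) : List (Int × Int × Int) :=
  ((PySem.List.pyRange 0 dx 1).flatMap fun ix =>
    (PySem.List.pyRange 0 dy 1).flatMap fun iy => [(ix, iy, 0), (ix, iy, dz - 1)]) ++
  ((PySem.List.pyRange 0 dx 1).flatMap fun ix =>
    (PySem.List.pyRange 0 dz 1).flatMap fun iz => [(ix, 0, iz), (ix, dy - 1, iz)]) ++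
  ((PySem.List.pyRange 0 dy 1).flatMap fun iy =>
    (PySem.List.pyRange 0 dz 1).flatMap fun iz => [(0, iy, iz), (dx - 1, iy, iz)])

-- 'if cell not in shell: outside[cell] = None'  (ordered dict used as ordered set)
def pvFaceAdd (shell : List (Int × Int × Int)) (o : List (Int × Int × Int))
    (c : Int × Int × Int) : List (Int × Int × Int) :=
  if c ∉ shell then PySem.Set.add o c else o

def pvSeedAlt (dx dy dz : Int) (shell : List (Int × Int × Int)) : List (Int × Int × Int) :=
  (pvCandAlt dx dy dz).foldl (pvFaceAdd shell) PySem.Set.empty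

-- one neighbour probe of a pass: state = (outside, changed)
def pvNbStep (dx dy dz : Int) (shell : List (Int × Int × Int))
    (st : List (Int × Int × Int) × Bool) (t : Int × Int × Int) :
    List (Int × Int × Int) × Bool :=
  if 0 ≤ t.1 ∧ t.1 < dx ∧ 0 ≤ t.2.1 ∧ t.2.1 < dy ∧ 0 ≤ t.2.2 ∧ t.2.2 < dz ∧
      t ∉ shell ∧ t ∉ st.1
  then (PySem.Set.add st.1 t, true) else st

-- one discovered cell of a pass: its six neighbour tuples in order
def pvScanCell (dx dy dz : Int) (shell : List (Int × Int × Int))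
    (st : List (Int × Int × Int) × Bool) (c : Int × Int × Int) :
    List (Int × Int × Int) × Bool :=
  [(c.1 + 1, c.2.1, c.2.2), (c.1 - 1, c.2.1, c.2.2), (c.1, c.2.1 + 1, c.2.2),
   (c.1, c.2.1 - 1, c.2.2), (c.1, c.2.1, c.2.2 + 1), (c.1, c.2.1, c.2.2 - 1)].foldl
    (pvNbStep dx dy dz shell) st

-- one full pass: rescan the snapshot of the discovered list, changed = False at the start
def pvPass (dx dy dz : Int) (shell : List (Int × Int × Int))
    (o : List (Int × Int × Int)) : List (Int × Int × Int) × Bool :=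
  o.foldl (pvScanCell dx dy dz shell) (o, false)

-- while changed: pass again (fuel only makes the loop total)
def pvFix (dx dy dz : Int) (shell : List (Int × Int × Int)) :
    Nat → List (Int × Int × Int) → List (Int × Int × Int)
  | 0, o => o
  | fuel+1, o =>
      let st := pvPass dx dy dz shell o
      if st.2 then pvFix dx dy dz shell fuel st.1 else st.1

def flood_fill_outside_py_alt (dx : Int) (dy : Int) (dz : Int) (shell : List (Int × Int × Int)) : List (Int × Int × Int) :=
  pvCanon (pvFix dx dy dz shell (dx.toNat * dy.toNat * dz.toNat + 1) (pvSeedAlt dx dy dz shell))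

-- ===== PRECONDITION & SPEC =====
def Spec_flood_fill_outside_py (dx : Int) (dy : Int) (dz : Int) (shell : List (Int × Int × Int)) (out : List (Int × Int × Int)) : Prop := out = flood_fill_outside_py_alt dx dy dz shell
instance (dx : Int) (dy : Int) (dz : Int) (shell : List (Int × Int × Int)) (out : List (Int × Int × Int)) : Decidable (Spec_flood_fill_outside_py dx dy dz shell out) := by unfold Spec_flood_fill_outside_py; infer_instance

-- ===== CLAIM (what is proved, stated in full; the proofs are below) =====
def Claim_equal_flood_fill_outside_py : Prop := ∀ (dx : Int) (dy : Int) (dz : Int) (shell : List (Int × Int × Int)), Dom_flood_fill_outside_py dx dy dz shell → Spec_flood_fill_outside_py dx dy dz shell (flood_fill_outside_py dx dy dz shell)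

-- ===== LEMMAS AND PROOFS =====

-- proof-side notions: the in-bounds non-shell cells, the grid, reachability from the seeded faces

def pvGood (dx dy dz : Int) (shell : List (Int × Int × Int)) (t : Int × Int × Int) : Prop :=
  0 ≤ t.1 ∧ t.1 < dx ∧ 0 ≤ t.2.1 ∧ t.2.1 < dy ∧ 0 ≤ t.2.2 ∧ t.2.2 < dz ∧ t ∉ shell

def pvGrid (dx dy dz : Int) : List (Int × Int × Int) :=
  (PySem.List.pyRange 0 dx 1).flatMap fun x =>
    (PySem.List.pyRange 0 dy 1).flatMap fun y =>
      (PySem.List.pyRange 0 dz 1).map fun z => (x, y, z)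

lemma mem_pvGrid (dx dy dz : Int) (c : Int × Int × Int) :
    c ∈ pvGrid dx dy dz ↔
      0 ≤ c.1 ∧ c.1 < dx ∧ 0 ≤ c.2.1 ∧ c.2.1 < dy ∧ 0 ≤ c.2.2 ∧ c.2.2 < dz := by
  obtain ⟨x, y, z⟩ := c
  simp only [pvGrid, List.mem_flatMap, List.mem_map, PySem.List.mem_pyRange_one, Prod.mk.injEq]
  constructor
  · rintro ⟨a, ⟨ha1, ha2⟩, b, ⟨hb1, hb2⟩, w, ⟨hw1, hw2⟩, rfl, rfl, rfl⟩
    exact ⟨ha1, ha2, hb1, hb2, hw1, hw2⟩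
  · rintro ⟨h1, h2, h3, h4, h5, h6⟩
    exact ⟨x, ⟨h1, h2⟩, y, ⟨h3, h4⟩, z, ⟨h5, h6⟩, rfl, rfl, rfl⟩

lemma length_pvGrid (dx dy dz : Int) :
    (pvGrid dx dy dz).length = dx.toNat * dy.toNat * dz.toNat := by
  simp [pvGrid, List.length_flatMap, PySem.List.length_pyRange_one, List.map_const',
        List.sum_replicate, smul_eq_mul]
  ring

def pvFaces1 (dx dy dz : Int) : List (Int × Int × Int) :=
  (PySem.List.pyRange 0 dx 1).flatMap fun ix =>
    (PySem.List.pyRange 0 dy 1).flatMap fun iy => [(ix, iy, 0), (ix, iy, dz - 1)]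
def pvFaces2 (dx dy dz : Int) : List (Int × Int × Int) :=
  (PySem.List.pyRange 0 dx 1).flatMap fun ix =>
    (PySem.List.pyRange 0 dz 1).flatMap fun iz => [(ix, 0, iz), (ix, dy - 1, iz)]
def pvFaces3 (dx dy dz : Int) : List (Int × Int × Int) :=
  (PySem.List.pyRange 0 dy 1).flatMap fun iy =>
    (PySem.List.pyRange 0 dz 1).flatMap fun iz => [(0, iy, iz), (dx - 1, iy, iz)]

inductive pvReach (dx dy dz : Int) (shell : List (Int × Int × Int)) : (Int × Int × Int) → Prop
  | seed (c : Int × Int × Int) : c ∈ (pvSeed dx dy dz shell).1 → pvReach dx dy dz shell c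
  | step (c d : Int × Int × Int) : pvReach dx dy dz shell c → d ∈ pvNeigh →
      pvGood dx dy dz shell (pvAdd c d) → pvReach dx dy dz shell (pvAdd c d)

def pvClosed (dx dy dz : Int) (shell : List (Int × Int × Int)) (s : List (Int × Int × Int)) : Prop :=
  ∀ c ∈ s, ∀ d ∈ pvNeigh, pvGood dx dy dz shell (pvAdd c d) → pvAdd c d ∈ s

lemma pvReach_mem (dx dy dz : Int) (shell s : List (Int × Int × Int))
    (hseed : ∀ c ∈ (pvSeed dx dy dz shell).1, c ∈ s)
    (hcl : pvClosed dx dy dz shell s) :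
    ∀ c, pvReach dx dy dz shell c → c ∈ s := by
  intro c h
  induction h with
  | seed c hc => exact hseed c hc
  | step c d _ hd hg ih => exact hcl c ih d hd hg

-- ===== the seed phase (port A) =====

lemma pvTryPush_fst_mem (shell : List (Int × Int × Int)) (st) (c x : Int × Int × Int) :
    x ∈ (pvTryPush shell st c).1 ↔ x ∈ st.1 ∨ (x = c ∧ c ∉ shell) := by
  unfold pvTryPush
  split
  · rename_i h
    constructor
    · exact Or.inl
    · rintro (hx | ⟨rfl, hns⟩)
      · exact hx
      · rcases h with h | h
        · exact absurd h hns
        · exact h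
  · rename_i h
    push Not at h
    rw [PySem.Set.add_of_not_mem h.2]
    simp only [List.mem_append, List.mem_singleton]
    constructor
    · rintro (hx | rfl)
      · exact Or.inl hx
      · exact Or.inr ⟨rfl, h.1⟩
    · rintro (hx | ⟨rfl, _⟩)
      · exact Or.inl hx
      · exact Or.inr rfl

lemma pvTryPush_fst_eq_snd (shell : List (Int × Int × Int)) (st) (c : Int × Int × Int)
    (h : st.1 = st.2) : (pvTryPush shell st c).1 = (pvTryPush shell st c).2 := by
  unfold pvTryPush
  split
  · exact h
  · rename_i hg
    push Not at hg
    rw [PySem.Set.add_of_not_mem hg.2, h]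

lemma pvTryPush_nodup (shell : List (Int × Int × Int)) (st) (c : Int × Int × Int)
    (h : st.1.Nodup) : (pvTryPush shell st c).1.Nodup := by
  unfold pvTryPush
  split
  · exact h
  · exact PySem.Set.nodup_add _ _ h

lemma foldl_tryPush_fst_mem (shell : List (Int × Int × Int)) (l : List (Int × Int × Int)) :
    ∀ st (x : Int × Int × Int),
      x ∈ (l.foldl (pvTryPush shell) st).1 ↔ x ∈ st.1 ∨ (x ∈ l ∧ x ∉ shell) := by
  induction l with
  | nil => intro st x; simp
  | cons a l ih =>
      intro st x
      rw [List.foldl_cons, ih, pvTryPush_fst_mem]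
      constructor
      · rintro ((hx | ⟨rfl, hns⟩) | ⟨hl, hns⟩)
        · exact Or.inl hx
        · exact Or.inr ⟨List.mem_cons_self, hns⟩
        · exact Or.inr ⟨List.mem_cons_of_mem _ hl, hns⟩
      · rintro (hx | ⟨hmem, hns⟩)
        · exact Or.inl (Or.inl hx)
        · rcases List.mem_cons.mp hmem with rfl | hl
          · exact Or.inl (Or.inr ⟨rfl, hns⟩)
          · exact Or.inr ⟨hl, hns⟩

lemma foldl_tryPush_fst_eq_snd (shell : List (Int × Int × Int)) (l : List (Int × Int × Int)) :
    ∀ st, st.1 = st.2 → (l.foldl (pvTryPush shell) st).1 = (l.foldl (pvTryPush shell) st).2 := by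
  induction l with
  | nil => intro st h; exact h
  | cons a l ih => intro st h; exact ih _ (pvTryPush_fst_eq_snd shell st a h)

lemma foldl_tryPush_nodup (shell : List (Int × Int × Int)) (l : List (Int × Int × Int)) :
    ∀ st, st.1.Nodup → (l.foldl (pvTryPush shell) st).1.Nodup := by
  induction l with
  | nil => intro st h; exact h
  | cons a l ih => intro st h; exact ih _ (pvTryPush_nodup shell st a h)

lemma pvSeed_eq_foldl (dx dy dz : Int) (shell : List (Int × Int × Int)) :
    pvSeed dx dy dz shell =
      ((pvFaces1 dx dy dz ++ pvFaces2 dx dy dz) ++ pvFaces3 dx dy dz).foldl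
        (pvTryPush shell) (PySem.Set.empty, []) := by
  unfold pvSeed pvFaces1 pvFaces2 pvFaces3
  simp only [List.foldl_append, List.foldl_flatMap, List.foldl_cons, List.foldl_nil]

lemma mem_pvSeed (dx dy dz : Int) (shell : List (Int × Int × Int)) (c : Int × Int × Int) :
    c ∈ (pvSeed dx dy dz shell).1 ↔
      (c ∈ pvFaces1 dx dy dz ∨ c ∈ pvFaces2 dx dy dz ∨ c ∈ pvFaces3 dx dy dz) ∧ c ∉ shell := by
  rw [pvSeed_eq_foldl, foldl_tryPush_fst_mem]
  simp [PySem.Set.empty, List.mem_append]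

lemma pvSeed_fst_eq_snd (dx dy dz : Int) (shell : List (Int × Int × Int)) :
    (pvSeed dx dy dz shell).1 = (pvSeed dx dy dz shell).2 := by
  rw [pvSeed_eq_foldl]
  exact foldl_tryPush_fst_eq_snd shell _ _ rfl

lemma nodup_pvSeed (dx dy dz : Int) (shell : List (Int × Int × Int)) :
    (pvSeed dx dy dz shell).1.Nodup := by
  rw [pvSeed_eq_foldl]
  exact foldl_tryPush_nodup shell _ _ (by simp [PySem.Set.empty])

-- ===== the BFS phase (port A) =====

def pvBfsStep (dx dy dz : Int) (shell : List (Int × Int × Int)) (c : Int × Int × Int)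
    (st : List (Int × Int × Int) × List (Int × Int × Int)) (d : Int × Int × Int) :
    List (Int × Int × Int) × List (Int × Int × Int) :=
  let t := pvAdd c d
  if 0 ≤ t.1 ∧ t.1 < dx ∧ 0 ≤ t.2.1 ∧ t.2.1 < dy ∧ 0 ≤ t.2.2 ∧ t.2.2 < dz ∧
      t ∉ shell ∧ t ∉ st.1
  then (PySem.Set.add st.1 t, st.2 ++ [t]) else st

lemma pvBfs_succ (dx dy dz : Int) (shell : List (Int × Int × Int)) (fuel : Nat)
    (outside q : List (Int × Int × Int)) (c : Int × Int × Int) :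
    pvBfs dx dy dz shell (fuel + 1) outside (c :: q) =
      pvBfs dx dy dz shell fuel
        (pvNeigh.foldl (pvBfsStep dx dy dz shell c) (outside, q)).1
        (pvNeigh.foldl (pvBfsStep dx dy dz shell c) (outside, q)).2 := rfl

lemma pvBfsStep_single (dx dy dz : Int) (shell : List (Int × Int × Int))
    (c : Int × Int × Int) (st : List (Int × Int × Int) × List (Int × Int × Int))
    (d : Int × Int × Int) :
    (∀ x ∈ st.1, x ∈ (pvBfsStep dx dy dz shell c st d).1) ∧
    (∀ x ∈ (pvBfsStep dx dy dz shell c st d).1,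
        x ∈ st.1 ∨ (x = pvAdd c d ∧ pvGood dx dy dz shell x)) ∧
    (∀ x ∈ (pvBfsStep dx dy dz shell c st d).2,
        x ∈ st.2 ∨ (x ∈ (pvBfsStep dx dy dz shell c st d).1 ∧ x ∉ st.1)) ∧
    (st.1.Nodup → (pvBfsStep dx dy dz shell c st d).1.Nodup) ∧
    (pvGood dx dy dz shell (pvAdd c d) → pvAdd c d ∈ (pvBfsStep dx dy dz shell c st d).1) ∧
    (∀ x ∈ (pvBfsStep dx dy dz shell c st d).1,
        x ∉ (pvBfsStep dx dy dz shell c st d).2 → x ∈ st.1 ∧ x ∉ st.2) ∧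
    ((pvBfsStep dx dy dz shell c st d).1.length + st.2.length =
        st.1.length + (pvBfsStep dx dy dz shell c st d).2.length) := by
  unfold pvBfsStep
  simp only []
  split
  · rename_i h
    obtain ⟨h1, h2, h3, h4, h5, h6, h7, h8⟩ := h
    rw [PySem.Set.add_of_not_mem h8]
    refine ⟨?_, ?_, ?_, ?_, ?_, ?_, ?_⟩
    · intro x hx; exact List.mem_append_left _ hx
    · intro x hx
      rcases List.mem_append.mp hx with hx | hx
      · exact Or.inl hx
      · rcases List.mem_singleton.mp hx with rfl
        exact Or.inr ⟨rfl, h1, h2, h3, h4, h5, h6, h7⟩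
    · intro x hx
      rcases List.mem_append.mp hx with hx | hx
      · exact Or.inl hx
      · rcases List.mem_singleton.mp hx with rfl
        exact Or.inr ⟨List.mem_append_right _ (List.mem_singleton_self _), h8⟩
    · intro hnd
      exact List.Nodup.append hnd (List.nodup_singleton _)
        (by intro a ha hb; rcases List.mem_singleton.mp hb with rfl; exact h8 ha)
    · intro _; exact List.mem_append_right _ (List.mem_singleton_self _)
    · intro x hx hnx
      rcases List.mem_append.mp hx with hx | hx
      · refine ⟨hx, fun hx2 => hnx (List.mem_append_left _ hx2)⟩
      · exact absurd (List.mem_append_right _ hx) hnx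
    · simp [List.length_append]
      omega
  · rename_i h
    push Not at h
    refine ⟨fun x hx => hx, fun x hx => Or.inl hx, fun x hx => Or.inl hx, fun h => h, ?_,
      fun x hx hnx => ⟨hx, hnx⟩, rfl⟩
    intro hg
    obtain ⟨g1, g2, g3, g4, g5, g6, g7⟩ := hg
    exact h g1 g2 g3 g4 g5 g6 g7

lemma pvBfsStep_foldl (dx dy dz : Int) (shell : List (Int × Int × Int))
    (c : Int × Int × Int) (l : List (Int × Int × Int)) :
    ∀ st : List (Int × Int × Int) × List (Int × Int × Int),
    (∀ x ∈ st.1, x ∈ (l.foldl (pvBfsStep dx dy dz shell c) st).1) ∧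
    (∀ x ∈ (l.foldl (pvBfsStep dx dy dz shell c) st).1,
        x ∈ st.1 ∨ ∃ d ∈ l, x = pvAdd c d ∧ pvGood dx dy dz shell x) ∧
    (∀ x ∈ (l.foldl (pvBfsStep dx dy dz shell c) st).2,
        x ∈ st.2 ∨ (x ∈ (l.foldl (pvBfsStep dx dy dz shell c) st).1 ∧ x ∉ st.1)) ∧
    (st.1.Nodup → (l.foldl (pvBfsStep dx dy dz shell c) st).1.Nodup) ∧
    (∀ d ∈ l, pvGood dx dy dz shell (pvAdd c d) →
        pvAdd c d ∈ (l.foldl (pvBfsStep dx dy dz shell c) st).1) ∧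
    (∀ x ∈ (l.foldl (pvBfsStep dx dy dz shell c) st).1,
        x ∉ (l.foldl (pvBfsStep dx dy dz shell c) st).2 → x ∈ st.1 ∧ x ∉ st.2) ∧
    ((l.foldl (pvBfsStep dx dy dz shell c) st).1.length + st.2.length =
        st.1.length + (l.foldl (pvBfsStep dx dy dz shell c) st).2.length) := by
  induction l with
  | nil =>
      intro st
      exact ⟨fun x hx => hx, fun x hx => Or.inl hx, fun x hx => Or.inl hx, fun h => h,
        fun d hd => absurd hd (List.not_mem_nil), fun x hx hnx => ⟨hx, hnx⟩, rfl⟩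
  | cons d l ih =>
      intro st
      obtain ⟨s1, s2, s3, s4, s5, s6, s7⟩ := pvBfsStep_single dx dy dz shell c st d
      obtain ⟨i1, i2, i3, i4, i5, i6, i7⟩ := ih (pvBfsStep dx dy dz shell c st d)
      rw [List.foldl_cons]
      refine ⟨?_, ?_, ?_, ?_, ?_, ?_, ?_⟩
      · intro x hx; exact i1 x (s1 x hx)
      · intro x hx
        rcases i2 x hx with hx' | ⟨d', hd', he, hg⟩
        · rcases s2 x hx' with hx'' | ⟨he, hg⟩
          · exact Or.inl hx''
          · exact Or.inr ⟨d, List.mem_cons_self, he, hg⟩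
        · exact Or.inr ⟨d', List.mem_cons_of_mem _ hd', he, hg⟩
      · intro x hx
        rcases i3 x hx with hx' | ⟨hx1, hx2⟩
        · rcases s3 x hx' with hx'' | ⟨hy1, hy2⟩
          · exact Or.inl hx''
          · exact Or.inr ⟨i1 x hy1, hy2⟩
        · exact Or.inr ⟨hx1, fun hc => hx2 (s1 x hc)⟩
      · intro hnd; exact i4 (s4 hnd)
      · intro d' hd' hg
        rcases List.mem_cons.mp hd' with rfl | hd'
        · exact i1 _ (s5 hg)
        · exact i5 d' hd' hg
      · intro x hx hnx
        obtain ⟨hx', hnx'⟩ := i6 x hx hnx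
        exact s6 x hx' hnx'
      · omega

def pvUA (dx dy dz : Int) (shell : List (Int × Int × Int)) : List (Int × Int × Int) :=
  (pvSeed dx dy dz shell).1 ++ pvGrid dx dy dz

lemma pvBfs_spec (dx dy dz : Int) (shell : List (Int × Int × Int)) :
    ∀ (fuel : Nat) (outside q : List (Int × Int × Int)),
      outside.Nodup →
      (∀ c ∈ q, c ∈ outside) →
      (∀ c ∈ outside, pvReach dx dy dz shell c) →
      (∀ c ∈ outside, c ∈ pvUA dx dy dz shell) →
      (∀ c ∈ outside, c ∉ q → ∀ d ∈ pvNeigh, pvGood dx dy dz shell (pvAdd c d) →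
          pvAdd c d ∈ outside) →
      q.length + ((pvUA dx dy dz shell).length - outside.length) ≤ fuel →
      (∀ c ∈ outside, c ∈ pvBfs dx dy dz shell fuel outside q) ∧
      (pvBfs dx dy dz shell fuel outside q).Nodup ∧
      (∀ c ∈ pvBfs dx dy dz shell fuel outside q, pvReach dx dy dz shell c) ∧
      (∀ c ∈ pvBfs dx dy dz shell fuel outside q, c ∈ pvUA dx dy dz shell) ∧
      pvClosed dx dy dz shell (pvBfs dx dy dz shell fuel outside q) := by
  intro fuel
  induction fuel with
  | zero =>
      intro outside q hnd hqo _ _ _ hm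
      match q with
      | [] =>
          rename_i hre hu hcl
          exact ⟨fun c hc => hc, hnd, hre, hu, fun c hc => hcl c hc (List.not_mem_nil)⟩
      | c :: q => simp at hm
  | succ fuel ih =>
      intro outside q hnd hqo hre hu hcl hm
      match q with
      | [] =>
          exact ⟨fun c hc => hc, hnd, hre, hu, fun c hc => hcl c hc (List.not_mem_nil)⟩
      | c :: q =>
          rw [pvBfs_succ]
          obtain ⟨f1, f2, f3, f4, f5, f6, f7⟩ :=
            pvBfsStep_foldl dx dy dz shell c pvNeigh (outside, q)
          set st := pvNeigh.foldl (pvBfsStep dx dy dz shell c) (outside, q) with hst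
          have hco : c ∈ outside := hqo c List.mem_cons_self
          have hnd' : st.1.Nodup := f4 hnd
          have hqo' : ∀ x ∈ st.2, x ∈ st.1 := by
            intro x hx
            rcases f3 x hx with hx' | hx'
            · exact f1 x (hqo x (List.mem_cons_of_mem _ hx'))
            · exact hx'.1
          have hre' : ∀ x ∈ st.1, pvReach dx dy dz shell x := by
            intro x hx
            rcases f2 x hx with hx' | ⟨d, hd, rfl, hg⟩
            · exact hre x hx'
            · exact pvReach.step c d (hre c hco) hd hg
          have hu' : ∀ x ∈ st.1, x ∈ pvUA dx dy dz shell := by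
            intro x hx
            rcases f2 x hx with hx' | ⟨d, hd, rfl, hg⟩
            · exact hu x hx'
            · obtain ⟨g1, g2, g3, g4, g5, g6, _⟩ := hg
              exact List.mem_append_right _
                ((mem_pvGrid dx dy dz _).mpr ⟨g1, g2, g3, g4, g5, g6⟩)
          have hcl' : ∀ x ∈ st.1, x ∉ st.2 → ∀ d ∈ pvNeigh,
              pvGood dx dy dz shell (pvAdd x d) → pvAdd x d ∈ st.1 := by
            intro x hx hnx d hd hg
            by_cases hxc : x = c
            · subst hxc; exact f5 d hd hg
            · obtain ⟨hx1, hx2⟩ := f6 x hx hnx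
              have : pvAdd x d ∈ outside :=
                hcl x hx1 (by simp [hxc, hx2]) d hd hg
              exact f1 _ this
          have hlen1 : outside.length ≤ st.1.length :=
            (List.subperm_of_subset hnd (fun x hx => f1 x hx)).length_le
          have hlen2 : st.1.length ≤ (pvUA dx dy dz shell).length :=
            (List.subperm_of_subset hnd' (fun x hx => hu' x hx)).length_le
          have hm' : st.2.length + ((pvUA dx dy dz shell).length - st.1.length) ≤ fuel := by
            have f7' : st.1.length + q.length = outside.length + st.2.length := by
              simpa using f7
            simp only [List.length_cons] at hm
            omega
          obtain ⟨r1, r2, r3, r4, r5⟩ := ih st.1 st.2 hnd' hqo' hre' hu' hcl' hm'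
          exact ⟨fun x hx => r1 x (f1 x hx), r2, r3, r4, r5⟩

-- ===== the seed phase (port B) equals A's seed set =====

lemma pvTryPush_fst (shell : List (Int × Int × Int)) (st) (c : Int × Int × Int) :
    (pvTryPush shell st c).1 = pvFaceAdd shell st.1 c := by
  unfold pvTryPush pvFaceAdd PySem.Set.add
  by_cases h1 : c ∈ shell <;> by_cases h2 : c ∈ st.1 <;>
    simp [h1, h2, PySem.Set.contains]

lemma foldl_tryPush_fst (shell : List (Int × Int × Int)) (l : List (Int × Int × Int)) :
    ∀ st, (l.foldl (pvTryPush shell) st).1 = l.foldl (pvFaceAdd shell) st.1 := by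
  induction l with
  | nil => intro st; rfl
  | cons a l ih =>
      intro st
      rw [List.foldl_cons, List.foldl_cons, ih, pvTryPush_fst]

lemma pvSeedAlt_eq (dx dy dz : Int) (shell : List (Int × Int × Int)) :
    pvSeedAlt dx dy dz shell = (pvSeed dx dy dz shell).1 := by
  rw [pvSeed_eq_foldl, foldl_tryPush_fst]
  unfold pvSeedAlt pvCandAlt pvFaces1 pvFaces2 pvFaces3
  simp only [List.foldl_append, List.foldl_flatMap]

-- ===== the pass phase (port B) =====

lemma pvNbStep_cases (dx dy dz : Int) (shell : List (Int × Int × Int))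
    (st : List (Int × Int × Int) × Bool) (t : Int × Int × Int) :
    (pvGood dx dy dz shell t ∧ t ∉ st.1 ∧
        pvNbStep dx dy dz shell st t = (st.1 ++ [t], true)) ∨
    (¬ (pvGood dx dy dz shell t ∧ t ∉ st.1) ∧ pvNbStep dx dy dz shell st t = st) := by
  unfold pvNbStep pvGood
  split
  · rename_i h
    obtain ⟨h1, h2, h3, h4, h5, h6, h7, h8⟩ := h
    exact Or.inl ⟨⟨h1, h2, h3, h4, h5, h6, h7⟩, h8, by rw [PySem.Set.add_of_not_mem h8]⟩
  · rename_i h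
    refine Or.inr ⟨?_, rfl⟩
    rintro ⟨⟨g1, g2, g3, g4, g5, g6, g7⟩, g8⟩
    exact h ⟨g1, g2, g3, g4, g5, g6, g7, g8⟩

-- the six neighbour tuples of c are exactly pvAdd c d for d in pvNeigh, in order
lemma pvScanCell_eq (dx dy dz : Int) (shell : List (Int × Int × Int))
    (st : List (Int × Int × Int) × Bool) (c : Int × Int × Int) :
    pvScanCell dx dy dz shell st c =
      pvNeigh.foldl (fun st d => pvNbStep dx dy dz shell st (pvAdd c d)) st := by
  have h1 : pvAdd c (1, 0, 0) = (c.1 + 1, c.2.1, c.2.2) := by simp [pvAdd]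
  have h2 : pvAdd c (-1, 0, 0) = (c.1 - 1, c.2.1, c.2.2) := by simp [pvAdd, sub_eq_add_neg]
  have h3 : pvAdd c (0, 1, 0) = (c.1, c.2.1 + 1, c.2.2) := by simp [pvAdd]
  have h4 : pvAdd c (0, -1, 0) = (c.1, c.2.1 - 1, c.2.2) := by simp [pvAdd, sub_eq_add_neg]
  have h5 : pvAdd c (0, 0, 1) = (c.1, c.2.1, c.2.2 + 1) := by simp [pvAdd]
  have h6 : pvAdd c (0, 0, -1) = (c.1, c.2.1, c.2.2 - 1) := by simp [pvAdd, sub_eq_add_neg]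
  unfold pvScanCell pvNeigh
  simp only [List.foldl_cons, List.foldl_nil, h1, h2, h3, h4, h5, h6]

-- invariants of scanning one reachable cell c (a fold over a sublist of pvNeigh)
lemma scan_cell_inv (dx dy dz : Int) (shell : List (Int × Int × Int))
    (c : Int × Int × Int) (hc : pvReach dx dy dz shell c) (l : List (Int × Int × Int))
    (hl : ∀ d ∈ l, d ∈ pvNeigh) :
    ∀ st : List (Int × Int × Int) × Bool,
      st.1.Nodup →
      (∀ x ∈ st.1, pvReach dx dy dz shell x) →
      (∀ x ∈ st.1, x ∈ pvUA dx dy dz shell) →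
      (∀ x ∈ st.1, x ∈ (l.foldl (fun st d => pvNbStep dx dy dz shell st (pvAdd c d)) st).1) ∧
      (l.foldl (fun st d => pvNbStep dx dy dz shell st (pvAdd c d)) st).1.Nodup ∧
      (∀ x ∈ (l.foldl (fun st d => pvNbStep dx dy dz shell st (pvAdd c d)) st).1,
        pvReach dx dy dz shell x) ∧
      (∀ x ∈ (l.foldl (fun st d => pvNbStep dx dy dz shell st (pvAdd c d)) st).1,
        x ∈ pvUA dx dy dz shell) ∧
      st.1.length ≤ (l.foldl (fun st d => pvNbStep dx dy dz shell st (pvAdd c d)) st).1.length ∧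
      ((l.foldl (fun st d => pvNbStep dx dy dz shell st (pvAdd c d)) st).2 = true →
        st.2 = true ∨
        st.1.length < (l.foldl (fun st d => pvNbStep dx dy dz shell st (pvAdd c d)) st).1.length) ∧
      ((l.foldl (fun st d => pvNbStep dx dy dz shell st (pvAdd c d)) st).2 = false →
        l.foldl (fun st d => pvNbStep dx dy dz shell st (pvAdd c d)) st = st ∧
        (∀ d ∈ l, pvGood dx dy dz shell (pvAdd c d) → pvAdd c d ∈ st.1)) := by
  induction l with
  | nil =>
      intro st h1 h2 h3
      exact ⟨fun x hx => hx, h1, h2, h3, le_refl _, fun h => Or.inl h,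
        fun _ => ⟨rfl, fun d hd => absurd hd (List.not_mem_nil)⟩⟩
  | cons d l ih =>
      intro st h1 h2 h3
      have hdn : d ∈ pvNeigh := hl d List.mem_cons_self
      have hl' : ∀ x ∈ l, x ∈ pvNeigh := fun x hx => hl x (List.mem_cons_of_mem _ hx)
      rw [List.foldl_cons]
      rcases pvNbStep_cases dx dy dz shell st (pvAdd c d) with ⟨hg, hm, he⟩ | ⟨hn, he⟩
      · rw [he]
        have h1' : (st.1 ++ [pvAdd c d]).Nodup :=
          List.Nodup.append h1 (List.nodup_singleton _)
            (by intro a ha hb; rcases List.mem_singleton.mp hb with rfl; exact hm ha)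
        have h2' : ∀ x ∈ st.1 ++ [pvAdd c d], pvReach dx dy dz shell x := by
          intro x hx
          rcases List.mem_append.mp hx with hx | hx
          · exact h2 x hx
          · rcases List.mem_singleton.mp hx with rfl
            exact pvReach.step c d hc hdn hg
        have h3' : ∀ x ∈ st.1 ++ [pvAdd c d], x ∈ pvUA dx dy dz shell := by
          intro x hx
          rcases List.mem_append.mp hx with hx | hx
          · exact h3 x hx
          · rcases List.mem_singleton.mp hx with rfl
            obtain ⟨g1, g2, g3, g4, g5, g6, _⟩ := hg
            exact List.mem_append_right _
              ((mem_pvGrid dx dy dz _).mpr ⟨g1, g2, g3, g4, g5, g6⟩)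
        obtain ⟨i1, i2, i3, i4, i5, _, i7⟩ := ih hl' (st.1 ++ [pvAdd c d], true) h1' h2' h3'
        refine ⟨fun x hx => i1 x (List.mem_append_left _ hx), i2, i3, i4, ?_, ?_, ?_⟩
        · calc st.1.length ≤ (st.1 ++ [pvAdd c d]).length := by simp
            _ ≤ _ := i5
        · intro _
          refine Or.inr (lt_of_lt_of_le ?_ i5)
          simp
        · intro hfl
          obtain ⟨heq, _⟩ := i7 hfl
          have : ((st.1 ++ [pvAdd c d] : List (Int × Int × Int)), true).2 = false := by
            rw [← heq]; exact hfl
          simp at this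
      · rw [he]
        obtain ⟨i1, i2, i3, i4, i5, i6, i7⟩ := ih hl' st h1 h2 h3
        refine ⟨i1, i2, i3, i4, i5, i6, ?_⟩
        intro hfl
        obtain ⟨heq, hno⟩ := i7 hfl
        refine ⟨heq, ?_⟩
        intro d' hd' hg'
        rcases List.mem_cons.mp hd' with rfl | hd'
        · by_contra hmem
          exact hn ⟨hg', hmem⟩
        · exact hno d' hd' hg'

-- invariants of one full pass (a fold of pvScanCell over the snapshot list)
lemma pass_foldl_inv (dx dy dz : Int) (shell : List (Int × Int × Int))
    (l : List (Int × Int × Int)) (hl : ∀ c ∈ l, pvReach dx dy dz shell c) :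
    ∀ st : List (Int × Int × Int) × Bool,
      st.1.Nodup →
      (∀ x ∈ st.1, pvReach dx dy dz shell x) →
      (∀ x ∈ st.1, x ∈ pvUA dx dy dz shell) →
      (∀ x ∈ st.1, x ∈ (l.foldl (pvScanCell dx dy dz shell) st).1) ∧
      (l.foldl (pvScanCell dx dy dz shell) st).1.Nodup ∧
      (∀ x ∈ (l.foldl (pvScanCell dx dy dz shell) st).1, pvReach dx dy dz shell x) ∧
      (∀ x ∈ (l.foldl (pvScanCell dx dy dz shell) st).1, x ∈ pvUA dx dy dz shell) ∧
      st.1.length ≤ (l.foldl (pvScanCell dx dy dz shell) st).1.length ∧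
      ((l.foldl (pvScanCell dx dy dz shell) st).2 = true →
        st.2 = true ∨ st.1.length < (l.foldl (pvScanCell dx dy dz shell) st).1.length) ∧
      ((l.foldl (pvScanCell dx dy dz shell) st).2 = false →
        l.foldl (pvScanCell dx dy dz shell) st = st ∧
        (∀ c ∈ l, ∀ d ∈ pvNeigh, pvGood dx dy dz shell (pvAdd c d) → pvAdd c d ∈ st.1)) := by
  induction l with
  | nil =>
      intro st h1 h2 h3
      exact ⟨fun x hx => hx, h1, h2, h3, le_refl _, fun h => Or.inl h,
        fun _ => ⟨rfl, fun c hc => absurd hc (List.not_mem_nil)⟩⟩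
  | cons c l ih =>
      intro st h1 h2 h3
      have hc : pvReach dx dy dz shell c := hl c List.mem_cons_self
      have hl' : ∀ x ∈ l, pvReach dx dy dz shell x := fun x hx => hl x (List.mem_cons_of_mem _ hx)
      rw [List.foldl_cons, pvScanCell_eq]
      obtain ⟨s1, s2, s3, s4, s5, s6, s7⟩ :=
        scan_cell_inv dx dy dz shell c hc pvNeigh (fun d hd => hd) st h1 h2 h3
      set st' := pvNeigh.foldl (fun st d => pvNbStep dx dy dz shell st (pvAdd c d)) st with hst'
      obtain ⟨i1, i2, i3, i4, i5, i6, i7⟩ := ih hl' st' s2 s3 s4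
      refine ⟨fun x hx => i1 x (s1 x hx), i2, i3, i4, le_trans s5 i5, ?_, ?_⟩
      · intro hfl
        rcases i6 hfl with hfl' | hlt
        · rcases s6 hfl' with h | h
          · exact Or.inl h
          · exact Or.inr (lt_of_lt_of_le h i5)
        · exact Or.inr (lt_of_le_of_lt s5 hlt)
      · intro hfl
        obtain ⟨ieq, ino⟩ := i7 hfl
        have hfl' : st'.2 = false := by rw [← ieq]; exact hfl
        obtain ⟨seq, sno⟩ := s7 hfl'
        rw [hst'] at ieq seq
        refine ⟨by rw [ieq, seq], ?_⟩
        intro c' hc' d hd hg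
        rcases List.mem_cons.mp hc' with rfl | hc'
        · exact sno d hd hg
        · have := ino c' hc' d hd hg
          rw [hst', seq] at this
          exact this

lemma pvFix_spec (dx dy dz : Int) (shell : List (Int × Int × Int)) :
    ∀ (fuel : Nat) (o : List (Int × Int × Int)),
      o.Nodup →
      (∀ c ∈ o, pvReach dx dy dz shell c) →
      (∀ c ∈ o, c ∈ pvUA dx dy dz shell) →
      ((pvUA dx dy dz shell).length - o.length) + 1 ≤ fuel →
      (∀ c ∈ o, c ∈ pvFix dx dy dz shell fuel o) ∧
      (pvFix dx dy dz shell fuel o).Nodup ∧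
      (∀ c ∈ pvFix dx dy dz shell fuel o, pvReach dx dy dz shell c) ∧
      (∀ c ∈ pvFix dx dy dz shell fuel o, c ∈ pvUA dx dy dz shell) ∧
      pvClosed dx dy dz shell (pvFix dx dy dz shell fuel o) := by
  intro fuel
  induction fuel with
  | zero => intro o _ _ _ hm; omega
  | succ fuel ih =>
      intro o hnd hre hu hm
      have hfix : pvFix dx dy dz shell (fuel + 1) o =
          (if (pvPass dx dy dz shell o).2 then
            pvFix dx dy dz shell fuel (pvPass dx dy dz shell o).1
          else (pvPass dx dy dz shell o).1) := rfl
      have hp : pvPass dx dy dz shell o = o.foldl (pvScanCell dx dy dz shell) (o, false) := rfl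
      obtain ⟨i1, i2, i3, i4, i5, i6, i7⟩ :=
        pass_foldl_inv dx dy dz shell o hre (o, false) hnd hre hu
      rw [hp] at hfix
      set st := o.foldl (pvScanCell dx dy dz shell) (o, false) with hst
      by_cases hflag : st.2 = true
      · rw [hfix, if_pos hflag]
        have hgrow : o.length < st.1.length := by
          rcases i6 hflag with h | h
          · exact absurd h (by simp)
          · exact h
        have hub : st.1.length ≤ (pvUA dx dy dz shell).length :=
          (List.subperm_of_subset i2 (fun x hx => i4 x hx)).length_le
        obtain ⟨r1, r2, r3, r4, r5⟩ := ih st.1 i2 i3 i4 (by omega)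
        exact ⟨fun c hc => r1 c (i1 c hc), r2, r3, r4, r5⟩
      · rw [hfix, if_neg hflag]
        have hfalse : st.2 = false := by
          cases h : st.2
          · rfl
          · exact absurd h hflag
        obtain ⟨hkeep, hno⟩ := i7 hfalse
        have hfst : st.1 = o := by rw [hkeep]
        rw [hfst]
        exact ⟨fun c hc => hc, hnd, hre, hu, fun c hc d hd hg => hno c hc d hd hg⟩

-- ===== canonical output: sorting by pvEnc, injective on Dom-bounded cells =====

def pvBnd (c : Int × Int × Int) : Prop :=
  -4294967296 ≤ c.1 ∧ c.1 ≤ 4294967296 ∧ -4294967296 ≤ c.2.1 ∧ c.2.1 ≤ 4294967296 ∧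
  -4294967296 ≤ c.2.2 ∧ c.2.2 ≤ 4294967296

lemma pvEnc_inj (a b : Int × Int × Int) (ha : pvBnd a) (hb : pvBnd b)
    (h : pvEnc a = pvEnc b) : a = b := by
  obtain ⟨a1, a2, a3⟩ := a
  obtain ⟨b1, b2, b3⟩ := b
  unfold pvEnc pvBnd at *
  dsimp at *
  have : a1 = b1 ∧ a2 = b2 ∧ a3 = b3 := by omega
  obtain ⟨rfl, rfl, rfl⟩ := this
  rfl

lemma pvCanon_eq (s t : List (Int × Int × Int)) (hs : s.Nodup) (ht : t.Nodup)
    (hm : ∀ c, c ∈ s ↔ c ∈ t) (hb : ∀ c ∈ s, pvBnd c) : pvCanon s = pvCanon t := by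
  unfold pvCanon
  have hperm : s.Perm t := (List.perm_ext_iff_of_nodup hs ht).mpr hm
  have h1 : (PySem.List.sorted s pvEnc false).Perm s := PySem.List.sorted_perm s pvEnc false
  have hpair : (PySem.List.sorted s pvEnc false).Pairwise (fun a b => pvEnc a ≤ pvEnc b) :=
    PySem.List.sorted_pairwise s pvEnc
  have hnds : (PySem.List.sorted s pvEnc false).Nodup := (h1.nodup_iff).mpr hs
  have hlt : (PySem.List.sorted s pvEnc false).Pairwise (fun a b => pvEnc a < pvEnc b) := by
    refine (hpair.and hnds).imp_of_mem ?_
    intro a b hma hmb hab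
    refine lt_of_le_of_ne hab.1 (fun he => hab.2 ?_)
    exact pvEnc_inj a b (hb a (h1.mem_iff.mp hma)) (hb b (h1.mem_iff.mp hmb)) he
  exact (PySem.List.sorted_eq_of_perm_of_pairwise_lt t _ pvEnc (h1.trans hperm) hlt).symm

lemma mem_faces_bnd (dx dy dz : Int)
    (hb : -2147483648 ≤ dx ∧ dx ≤ 2147483648 ∧ -2147483648 ≤ dy ∧ dy ≤ 2147483648 ∧
          -2147483648 ≤ dz ∧ dz ≤ 2147483648)
    (c : Int × Int × Int)
    (h : c ∈ pvFaces1 dx dy dz ∨ c ∈ pvFaces2 dx dy dz ∨ c ∈ pvFaces3 dx dy dz) : pvBnd c := by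
  rcases h with h | h | h
  · simp only [pvFaces1, List.mem_flatMap, PySem.List.mem_pyRange_one, List.mem_cons,
      List.not_mem_nil, or_false] at h
    obtain ⟨a, ⟨ha1, ha2⟩, b, ⟨hb1, hb2⟩, h⟩ := h
    rcases h with rfl | rfl <;> (unfold pvBnd; dsimp; omega)
  · simp only [pvFaces2, List.mem_flatMap, PySem.List.mem_pyRange_one, List.mem_cons,
      List.not_mem_nil, or_false] at h
    obtain ⟨a, ⟨ha1, ha2⟩, b, ⟨hb1, hb2⟩, h⟩ := h
    rcases h with rfl | rfl <;> (unfold pvBnd; dsimp; omega)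
  · simp only [pvFaces3, List.mem_flatMap, PySem.List.mem_pyRange_one, List.mem_cons,
      List.not_mem_nil, or_false] at h
    obtain ⟨a, ⟨ha1, ha2⟩, b, ⟨hb1, hb2⟩, h⟩ := h
    rcases h with rfl | rfl <;> (unfold pvBnd; dsimp; omega)

lemma mem_pvUA_bnd (dx dy dz : Int) (shell : List (Int × Int × Int))
    (hb : -2147483648 ≤ dx ∧ dx ≤ 2147483648 ∧ -2147483648 ≤ dy ∧ dy ≤ 2147483648 ∧
          -2147483648 ≤ dz ∧ dz ≤ 2147483648)
    (c : Int × Int × Int) (h : c ∈ pvUA dx dy dz shell) : pvBnd c := by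
  rcases List.mem_append.mp h with h | h
  · exact mem_faces_bnd dx dy dz hb c ((mem_pvSeed dx dy dz shell c).mp h).1
  · obtain ⟨h1, h2, h3, h4, h5, h6⟩ := (mem_pvGrid dx dy dz c).mp h
    unfold pvBnd
    omega

-- ===== VERDICT (by name: the statement is the Claim_ definition above) =====
theorem flood_fill_outside_py_spec : Claim_equal_flood_fill_outside_py := by
  intro dx dy dz shell hDom
  unfold Spec_flood_fill_outside_py
  have hb : -2147483648 ≤ dx ∧ dx ≤ 2147483648 ∧ -2147483648 ≤ dy ∧ dy ≤ 2147483648 ∧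
      -2147483648 ≤ dz ∧ dz ≤ 2147483648 := by
    simp only [Dom_flood_fill_outside_py, pvDomInt, Bool.and_eq_true, decide_eq_true_eq] at hDom
    tauto
  show flood_fill_outside_py dx dy dz shell = flood_fill_outside_py_alt dx dy dz shell
  unfold flood_fill_outside_py flood_fill_outside_py_alt
  rw [pvSeedAlt_eq]
  -- A side
  have hmA : (pvSeed dx dy dz shell).2.length +
      ((pvUA dx dy dz shell).length - (pvSeed dx dy dz shell).1.length) ≤
      (pvSeed dx dy dz shell).2.length + dx.toNat * dy.toNat * dz.toNat := by
    have h1 : (pvUA dx dy dz shell).length =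
        (pvSeed dx dy dz shell).1.length + (pvGrid dx dy dz).length := List.length_append ..
    have h2 := length_pvGrid dx dy dz
    omega
  obtain ⟨a1, a2, a3, a4, a5⟩ := pvBfs_spec dx dy dz shell
    ((pvSeed dx dy dz shell).2.length + dx.toNat * dy.toNat * dz.toNat)
    (pvSeed dx dy dz shell).1 (pvSeed dx dy dz shell).2
    (nodup_pvSeed dx dy dz shell)
    (by intro c hc; rw [pvSeed_fst_eq_snd]; exact hc)
    (fun c hc => pvReach.seed c hc)
    (fun c hc => List.mem_append_left _ hc)
    (by
      intro c hc hnc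
      rw [pvSeed_fst_eq_snd] at hc
      exact absurd hc hnc)
    hmA
  have memA : ∀ c, c ∈ pvBfs dx dy dz shell
      ((pvSeed dx dy dz shell).2.length + dx.toNat * dy.toNat * dz.toNat)
      (pvSeed dx dy dz shell).1 (pvSeed dx dy dz shell).2 ↔ pvReach dx dy dz shell c := by
    intro c
    exact ⟨a3 c, fun h => pvReach_mem dx dy dz shell _ a1 a5 c h⟩
  -- B side
  have hmB : ((pvUA dx dy dz shell).length - (pvSeed dx dy dz shell).1.length) + 1 ≤
      dx.toNat * dy.toNat * dz.toNat + 1 := by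
    have h1 : (pvUA dx dy dz shell).length =
        (pvSeed dx dy dz shell).1.length + (pvGrid dx dy dz).length := List.length_append ..
    have h2 := length_pvGrid dx dy dz
    omega
  obtain ⟨b1, b2, b3, b4, b5⟩ := pvFix_spec dx dy dz shell
    (dx.toNat * dy.toNat * dz.toNat + 1) (pvSeed dx dy dz shell).1
    (nodup_pvSeed dx dy dz shell)
    (fun c hc => pvReach.seed c hc)
    (fun c hc => List.mem_append_left _ hc)
    hmB
  have memB : ∀ c, c ∈ pvFix dx dy dz shell (dx.toNat * dy.toNat * dz.toNat + 1)
      (pvSeed dx dy dz shell).1 ↔ pvReach dx dy dz shell c := by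
    intro c
    exact ⟨b3 c, fun h => pvReach_mem dx dy dz shell _ b1 b5 c h⟩
  exact pvCanon_eq _ _ a2 b2 (fun c => (memA c).trans (memB c).symm)
    (fun c hc => mem_pvUA_bnd dx dy dz shell hb c (a4 c hc))
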